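-- pv_equiv track=rewrite | github.com/ensomniac/dash | pydash/Dash/Utils/file.py | get_tagless_filename
-- ===== SOURCE A (Python) =====
-- def get_tagless_filename(filename):
--     if ")." not in filename:
--         return filename
--
--     split = filename.split(").")
--     sub_split = split[0].split("(")
--
--     if not sub_split[-1].isdigit():
--         return filename
--
--     sub_split.pop()
--
--     return get_tagless_filename(f"{'('.join(sub_split).strip()}.{split[-1]}")
-- ===== SOURCE B (Python) =====
-- def get_tagless_filename(filename):
--     while True:
--         i = filename.find(").")
--         if i == -1:
--             return filename
--         head = filename[:i]
--         j = head.rfind("(")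
--         if not head[j + 1:].isdigit():
--             return filename
--         rest = head[:j] if j != -1 else ""
--         filename = rest.strip() + "." + filename[filename.rfind(").") + 2:]
-- ===== Notes on version B (the rewrite author's own statement) =====
-- stated objective: alternative
-- what changed: A recursively splits the name into piece lists (split('.)'), split('('), pop, '('.join) and recurses on the rebuilt string; B is an iterative while loop that never builds piece lists: find/rfind locate the first ').' and the last '(' and the name is rebuilt from two slices by index arithmetic.
import Mathlib
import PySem

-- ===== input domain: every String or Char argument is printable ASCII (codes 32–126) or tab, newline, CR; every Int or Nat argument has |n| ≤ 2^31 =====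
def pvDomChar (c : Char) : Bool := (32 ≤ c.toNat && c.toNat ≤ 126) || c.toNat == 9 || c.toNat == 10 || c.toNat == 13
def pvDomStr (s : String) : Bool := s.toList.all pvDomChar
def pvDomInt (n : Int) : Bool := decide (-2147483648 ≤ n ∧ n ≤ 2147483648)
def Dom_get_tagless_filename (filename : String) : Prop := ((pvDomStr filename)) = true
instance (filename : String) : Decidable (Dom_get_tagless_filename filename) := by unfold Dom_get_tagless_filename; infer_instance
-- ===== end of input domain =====

-- B replaces A's recursion over split/pop/join piece lists by an iterative while loop doing index
-- arithmetic (find/rfind + two slices); same return value on every input (both are total).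

-- ===== PORT A =====
-- Port of A: the recursive Python function, transliterated on the code-point list
-- (split = filename.split(")."), sub_split = split[0].split("("), digit test on sub_split[-1],
--  pop + "(".join + strip + f-string rebuild, then the recursive call). The Nat argument is a
-- fuel guard that only makes the recursion total; get_tagless_filename passes length + 1, and the
-- port of B consumes fuel in lockstep, so the equivalence theorem holds whatever the fuel value.
def pvGtfA : Nat → List Char → List Char
  | 0, s => s
  | fuel + 1, s =>
    if PySem.Chars.isIn [')', '.'] s = false then s
    else
      let split := PySem.Chars.splitOn s [')', '.']
      let sub_split := PySem.Chars.splitOn (split.headD []) ['(']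
      if PySem.Chars.strIsdigit (sub_split.getLastD []) = false then s
      else
        pvGtfA fuel (PySem.Chars.strip (PySem.Chars.join ['('] sub_split.dropLast)
          ++ '.' :: split.getLastD [])

def get_tagless_filename (filename : String) : String :=
  String.ofList (pvGtfA (filename.toList.length + 1) filename.toList)

-- ===== PORT B =====
-- Port of B: the while loop of Source B as tail recursion (same fuel guard, consumed once per
-- iteration); each iteration works by index arithmetic (i = find, j = rfind on the head slice)
-- and rebuilds the name from two slices.
def pvGtfB : Nat → List Char → List Char
  | 0, s => s
  | fuel + 1, s =>
    let i := PySem.Chars.find s [')', '.']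
    if i = -1 then s
    else
      let head := PySem.List.slice s none (some i)
      let j := PySem.Chars.rfind head ['(']
      if PySem.Chars.strIsdigit (PySem.List.slice head (some (j + 1)) none) = false then s
      else
        let rest := if j ≠ -1 then PySem.List.slice head none (some j) else []
        pvGtfB fuel (PySem.Chars.strip rest ++ '.' ::
          PySem.List.slice s (some (PySem.Chars.rfind s [')', '.'] + 2)) none)

def get_tagless_filename_alt (filename : String) : String :=
  String.ofList (pvGtfB (filename.toList.length + 1) filename.toList)

-- ===== PRECONDITION & SPEC =====
-- A is total (no exceptions on any str input), so there is no Pre_.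
def Spec_get_tagless_filename (filename : String) (out : String) : Prop := out = get_tagless_filename_alt filename
instance (filename : String) (out : String) : Decidable (Spec_get_tagless_filename filename out) := by unfold Spec_get_tagless_filename; infer_instance

-- ===== CLAIM (what is proved, stated in full; the proofs are below) =====
def Claim_equal_get_tagless_filename : Prop := ∀ (filename : String), Dom_get_tagless_filename filename → Spec_get_tagless_filename filename (get_tagless_filename filename)

-- ===== LEMMAS AND PROOFS =====
-- Layer 1: specs for PySem.Chars.find / rfind (first / last occurrence of `sub` in `s`).
-- Layer 2: pvSplit, a structural model of Python's str.split, proved equal to PySem.Chars.splitOn,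
--          with head / last / join-of-dropLast characterised by find / rfind and slicing.
-- Layer 3: both ports' single iterations rewritten to one canonical step, then induction on fuel.
theorem pvRfindGo_eq {s sub : List Char} {k : Nat} (hk : sub <+: s.drop k)
    (hmax : ∀ i, k < i → ¬ sub <+: s.drop i) : ∀ j, k ≤ j → PySem.Chars.rfind.go s sub j = (k : Int) := by
  intro j
  induction j with
  | zero =>
    intro h
    have hk0 : k = 0 := by omega
    subst hk0
    have hp : sub.isPrefixOf s = true := List.isPrefixOf_iff_prefix.mpr (by simpa using hk)
    simp [PySem.Chars.rfind.go, hp]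
  | succ n ih =>
    intro h
    by_cases hkn : k = n + 1
    · subst hkn
      have hp : sub.isPrefixOf (s.drop (n+1)) = true := List.isPrefixOf_iff_prefix.mpr hk
      simp [PySem.Chars.rfind.go, hp]
    · have hnp : ¬ sub.isPrefixOf (s.drop (n+1)) = true := by
        rw [List.isPrefixOf_iff_prefix]
        exact hmax _ (by omega)
      simp only [PySem.Chars.rfind.go]
      rw [if_neg hnp]
      exact ih (by omega)

theorem pvRfindGo_none {s sub : List Char} : ∀ j, (∀ i, i ≤ j → ¬ sub <+: s.drop i) →
    PySem.Chars.rfind.go s sub j = -1 := by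
  intro j
  induction j with
  | zero =>
    intro h
    have hnp : ¬ sub.isPrefixOf s = true := by
      rw [List.isPrefixOf_iff_prefix]
      simpa using h 0 le_rfl
    simp only [PySem.Chars.rfind.go]
    rw [if_neg hnp]
  | succ n ih =>
    intro h
    have hnp : ¬ sub.isPrefixOf (s.drop (n+1)) = true := by
      rw [List.isPrefixOf_iff_prefix]
      exact h (n+1) le_rfl
    simp only [PySem.Chars.rfind.go]
    rw [if_neg hnp]
    exact ih (fun i hi => h i (by omega))

theorem pvOcc_length {sep s : List Char} {i : Nat} (h : sep <+: s.drop i) (hsep : sep ≠ []) :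
    i + sep.length ≤ s.length := by
  have h1 : sep.length ≤ (s.drop i).length := h.length_le
  have h2 : sep.length ≠ 0 := by simpa using hsep
  simp only [List.length_drop] at h1
  omega

theorem pvRfind_eq {s sub : List Char} {k : Nat} (hsub : sub ≠ []) (hk : sub <+: s.drop k)
    (hmax : ∀ i, k < i → ¬ sub <+: s.drop i) : PySem.Chars.rfind s sub = (k : Int) := by
  have hkl : k ≤ s.length := by
    have := pvOcc_length hk hsub
    omega
  unfold PySem.Chars.rfind
  exact pvRfindGo_eq hk hmax s.length hkl

theorem pvRfind_none {s sub : List Char} (h : ∀ i, ¬ sub <+: s.drop i) :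
    PySem.Chars.rfind s sub = -1 := by
  unfold PySem.Chars.rfind
  exact pvRfindGo_none s.length (fun i _ => h i)

-- existence of a maximal occurrence
theorem pvExistsMax {s sub : List Char} (hsub : sub ≠ []) (hocc : ∃ i, sub <+: s.drop i) :
    ∃ k, sub <+: s.drop k ∧ ∀ i, k < i → ¬ sub <+: s.drop i := by
  obtain ⟨i0, hi0⟩ := hocc
  have hbd : ∀ i, sub <+: s.drop i → i ≤ s.length := by
    intro i hi
    have := pvOcc_length hi hsub
    have : sub.length ≠ 0 := by simpa using hsub
    omega
  classical
  let P : Nat → Prop := fun i => sub <+: s.drop i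
  have hP : P (Nat.findGreatest P s.length) :=
    Nat.findGreatest_spec (hbd i0 hi0) hi0
  refine ⟨Nat.findGreatest P s.length, hP, ?_⟩
  intro i hi hpi
  by_cases hil : i ≤ s.length
  · exact Nat.findGreatest_is_greatest hi hil hpi
  · exact hil (hbd i hpi)

theorem pvRfind_spec {s sub : List Char} (hsub : sub ≠ []) (hocc : ∃ i, sub <+: s.drop i) :
    0 ≤ PySem.Chars.rfind s sub ∧ sub <+: s.drop (PySem.Chars.rfind s sub).toNat ∧
      ∀ i, (PySem.Chars.rfind s sub).toNat < i → ¬ sub <+: s.drop i := by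
  obtain ⟨k, hk, hmax⟩ := pvExistsMax hsub hocc
  have h := pvRfind_eq hsub hk hmax
  rw [h]
  simpa using ⟨hk, hmax⟩

def pvSplit (sep : List Char) : List Char → List (List Char)
  | [] => [[]]
  | c :: rest =>
    if sep.isPrefixOf (c :: rest) then
      [] :: pvSplit sep (rest.drop (sep.length - 1))
    else
      (pvSplit sep rest).modifyHead (c :: ·)
termination_by l => l.length
decreasing_by
all_goals simp only [List.length_cons, List.length_drop]; omega

theorem pvSplit_ne_nil (sep l) : pvSplit sep l ≠ [] := by
  induction l using pvSplit.induct sep with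
  | case1 => simp [pvSplit]
  | case2 c rest h ih => simp [pvSplit, h]
  | case3 c rest h ih =>
    simp only [pvSplit, if_neg h]
    cases hsp : pvSplit sep rest with
    | nil => exact absurd hsp ih
    | cons a t => simp

theorem pvSplitGo_eq (sep : List Char) (hsep : sep ≠ []) : ∀ fuel (l cur acc : _),
    l.length < fuel →
    PySem.Chars.splitOn.go sep fuel l cur acc
      = acc.reverse ++ ((pvSplit sep l).modifyHead (cur.reverse ++ ·)) := by
  intro fuel
  induction fuel with
  | zero => intro l cur acc h; omega
  | succ n ih =>
    intro l cur acc h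
    cases l with
    | nil =>
      simp [PySem.Chars.splitOn.go, pvSplit]
    | cons c rest =>
      by_cases hp : sep.isPrefixOf (c :: rest) = true
      · have hstep : PySem.Chars.splitOn.go sep (n+1) (c :: rest) cur acc
            = PySem.Chars.splitOn.go sep n (List.drop sep.length (c :: rest)) [] (cur.reverse :: acc) := by
          simp only [PySem.Chars.splitOn.go]
          rw [if_pos hp]
        rw [hstep]
        have hlen : (List.drop sep.length (c :: rest)).length < n := by
          have : 1 ≤ sep.length := by
            cases sep with
            | nil => exact absurd rfl hsep
            | cons a t => simp
          simp only [List.length_drop, List.length_cons] at *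
          omega
        rw [ih _ _ _ hlen]
        have hdrop : List.drop sep.length (c :: rest) = rest.drop (sep.length - 1) := by
          cases sep with
          | nil => exact absurd rfl hsep
          | cons a t => simp
        simp only [pvSplit, if_pos hp, hdrop]
        cases hsp : pvSplit sep (rest.drop (sep.length - 1)) with
        | nil => exact absurd hsp (pvSplit_ne_nil _ _)
        | cons a t => simp
      · have hstep : PySem.Chars.splitOn.go sep (n+1) (c :: rest) cur acc
            = PySem.Chars.splitOn.go sep n rest (c :: cur) acc := by
          simp only [PySem.Chars.splitOn.go]
          rw [if_neg hp]
        rw [hstep]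
        rw [ih _ _ _ (by simp at h ⊢; omega)]
        simp only [pvSplit, if_neg hp]
        cases hsp : pvSplit sep rest with
        | nil => exact absurd hsp (pvSplit_ne_nil _ _)
        | cons a t => simp

theorem pvSplitOn_eq (sep l : List Char) (hsep : sep ≠ []) :
    PySem.Chars.splitOn l sep = pvSplit sep l := by
  unfold PySem.Chars.splitOn
  rw [pvSplitGo_eq sep hsep _ _ _ _ (by omega)]
  cases hsp : pvSplit sep l with
  | nil => exact absurd hsp (pvSplit_ne_nil _ _)
  | cons a t => simp

theorem pvGetLastD_cons_ne_nil {α : Type} (a : α) (d : α) {t : List α} (h : t ≠ []) :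
    (a :: t).getLastD d = t.getLastD d := by
  cases t with
  | nil => exact absurd rfl h
  | cons x xs => simp

theorem pvGetLastD_modifyHead {α : Type} (f : α → α) (d : α) {u : List α} (h : 2 ≤ u.length) :
    (u.modifyHead f).getLastD d = u.getLastD d := by
  match u with
  | x :: y :: t => simp

theorem pvDropLast_modifyHead {α : Type} (f : α → α) {u : List α} (h : 2 ≤ u.length) :
    (u.modifyHead f).dropLast = u.dropLast.modifyHead f := by
  match u with
  | x :: y :: t => simp

theorem pvJoin_modifyHead_cons (sep : List Char) (c : Char) {v : List (List Char)} (h : v ≠ []) :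
    PySem.Chars.join sep (v.modifyHead (c :: ·)) = c :: PySem.Chars.join sep v := by
  match v with
  | [x] => simp [PySem.Chars.join_singleton]
  | x :: y :: t => simp [PySem.Chars.join_cons_cons]

theorem pvSplit_no_occ (sep : List Char) {l : List Char} (h : ∀ i, ¬ sep <+: l.drop i) :
    pvSplit sep l = [l] := by
  induction l using pvSplit.induct sep with
  | case1 => simp [pvSplit]
  | case2 c rest hp ih =>
    exact absurd (by simpa using List.isPrefixOf_iff_prefix.mp hp) (h 0)
  | case3 c rest hp ih =>
    simp only [pvSplit, if_neg hp]
    rw [ih (fun i => by simpa using h (i+1))]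
    simp

theorem pvSplit_two_le (sep : List Char) {l : List Char} {k : Nat} (hsep : sep ≠ [])
    (hk : sep <+: l.drop k) : 2 ≤ (pvSplit sep l).length := by
  induction l using pvSplit.induct sep generalizing k with
  | case1 =>
    simp only [List.drop_nil] at hk
    exact absurd (List.prefix_nil.mp hk) hsep
  | case2 c rest hp ih =>
    simp only [pvSplit, if_pos hp, List.length_cons]
    have := pvSplit_ne_nil sep (rest.drop (sep.length - 1))
    cases hsp : pvSplit sep (rest.drop (sep.length - 1)) with
    | nil => exact absurd hsp this
    | cons a t => simp
  | case3 c rest hp ih =>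
    have hk0 : k ≠ 0 := by
      intro h0
      subst h0
      exact hp (List.isPrefixOf_iff_prefix.mpr (by simpa using hk))
    obtain ⟨j, rfl⟩ : ∃ j, k = j + 1 := ⟨k - 1, by omega⟩
    simp only [List.drop_succ_cons] at hk
    simp only [pvSplit, if_neg hp, List.length_modifyHead]
    exact ih hk

theorem pvSplit_headD (sep : List Char) {l : List Char} {k : Nat} (hsep : sep ≠ [])
    (hk : sep <+: l.drop k) (hmin : ∀ i, i < k → ¬ sep <+: l.drop i) :
    (pvSplit sep l).headD [] = l.take k := by
  induction l using pvSplit.induct sep generalizing k with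
  | case1 =>
    simp only [List.drop_nil] at hk
    exact absurd (List.prefix_nil.mp hk) hsep
  | case2 c rest hp ih =>
    have hk0 : k = 0 := by
      by_contra h0
      exact hmin 0 (by omega) (by simpa using List.isPrefixOf_iff_prefix.mp hp)
    subst hk0
    simp only [pvSplit]
    rw [if_pos hp]
    simp
  | case3 c rest hp ih =>
    have hk0 : k ≠ 0 := by
      intro h0
      subst h0
      exact hp (List.isPrefixOf_iff_prefix.mpr (by simpa using hk))
    obtain ⟨j, rfl⟩ : ∃ j, k = j + 1 := ⟨k - 1, by omega⟩
    simp only [List.drop_succ_cons] at hk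
    have hmin' : ∀ i, i < j → ¬ sep <+: rest.drop i := by
      intro i hi
      simpa using hmin (i+1) (by omega)
    simp only [pvSplit, if_neg hp]
    cases hsp : pvSplit sep rest with
    | nil => exact absurd hsp (pvSplit_ne_nil _ _)
    | cons a t =>
      have := ih hk hmin'
      rw [hsp] at this
      simp only [List.headD_cons] at this
      simp [this]

theorem pvSplit_getLastD (sep : List Char) {l : List Char} {k : Nat} (hsep : sep ≠ [])
    (hover : ∀ i, 0 < i → i < sep.length → ∀ v : List Char, sep <+: v → ¬ sep <+: v.drop i)
    (hk : sep <+: l.drop k) (hmax : ∀ i, k < i → ¬ sep <+: l.drop i) :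
    (pvSplit sep l).getLastD [] = l.drop (k + sep.length) := by
  induction l using pvSplit.induct sep generalizing k with
  | case1 =>
    simp only [List.drop_nil] at hk
    exact absurd (List.prefix_nil.mp hk) hsep
  | case2 c rest hp ih =>
    have hsl : 1 ≤ sep.length := by
      have : sep.length ≠ 0 := by simpa using hsep
      omega
    have hdrop : rest.drop (sep.length - 1) = (c :: rest).drop sep.length := by
      obtain ⟨m, hm⟩ : ∃ m, sep.length = m + 1 := ⟨sep.length - 1, by omega⟩
      simp [hm]
    have hshift : ∀ j, (rest.drop (sep.length - 1)).drop j = (c :: rest).drop (sep.length + j) := by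
      intro j
      rw [hdrop, List.drop_drop, Nat.add_comm]
    simp only [pvSplit]
    rw [if_pos hp]
    rw [pvGetLastD_cons_ne_nil _ _ (pvSplit_ne_nil _ _)]
    by_cases hk0 : k = 0
    · subst hk0
      have hno : ∀ i, ¬ sep <+: (rest.drop (sep.length - 1)).drop i := by
        intro i
        rw [hshift]
        exact hmax _ (by omega)
      rw [pvSplit_no_occ sep hno, hdrop]
      simp
    · have hp0 : sep <+: (c :: rest) := by simpa using List.isPrefixOf_iff_prefix.mp hp
      have hksl : sep.length ≤ k := by
        by_contra hlt
        exact hover k (by omega) (by omega) (c :: rest) hp0 hk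
      have hk' : sep <+: (rest.drop (sep.length - 1)).drop (k - sep.length) := by
        rw [hshift]
        have : sep.length + (k - sep.length) = k := by omega
        rw [this]
        exact hk
      have hmax' : ∀ i, k - sep.length < i → ¬ sep <+: (rest.drop (sep.length - 1)).drop i := by
        intro i hi
        rw [hshift]
        exact hmax _ (by omega)
      rw [ih hk' hmax', hdrop, List.drop_drop]
      congr 1
      omega
  | case3 c rest hp ih =>
    have hk0 : k ≠ 0 := by
      intro h0
      subst h0
      exact hp (List.isPrefixOf_iff_prefix.mpr (by simpa using hk))
    obtain ⟨j, rfl⟩ : ∃ j, k = j + 1 := ⟨k - 1, by omega⟩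
    simp only [List.drop_succ_cons] at hk
    have hmax' : ∀ i, j < i → ¬ sep <+: rest.drop i := by
      intro i hi
      simpa using hmax (i+1) (by omega)
    simp only [pvSplit]
    rw [if_neg hp]
    rw [pvGetLastD_modifyHead _ _ (pvSplit_two_le sep hsep hk)]
    rw [ih hk hmax']
    have harith : j + 1 + sep.length = (j + sep.length) + 1 := by omega
    rw [harith, List.drop_succ_cons]

theorem pvSplit_join_dropLast (sep : List Char) {l : List Char} {k : Nat} (hsep : sep ≠ [])
    (hover : ∀ i, 0 < i → i < sep.length → ∀ v : List Char, sep <+: v → ¬ sep <+: v.drop i)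
    (hk : sep <+: l.drop k) (hmax : ∀ i, k < i → ¬ sep <+: l.drop i) :
    PySem.Chars.join sep ((pvSplit sep l).dropLast) = l.take k := by
  induction l using pvSplit.induct sep generalizing k with
  | case1 =>
    simp only [List.drop_nil] at hk
    exact absurd (List.prefix_nil.mp hk) hsep
  | case2 c rest hp ih =>
    have hsl : 1 ≤ sep.length := by
      have : sep.length ≠ 0 := by simpa using hsep
      omega
    have hdrop : rest.drop (sep.length - 1) = (c :: rest).drop sep.length := by
      obtain ⟨m, hm⟩ : ∃ m, sep.length = m + 1 := ⟨sep.length - 1, by omega⟩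
      simp [hm]
    have hshift : ∀ j, (rest.drop (sep.length - 1)).drop j = (c :: rest).drop (sep.length + j) := by
      intro j
      rw [hdrop, List.drop_drop, Nat.add_comm]
    have hp0 : sep <+: (c :: rest) := by simpa using List.isPrefixOf_iff_prefix.mp hp
    simp only [pvSplit]
    rw [if_pos hp]
    by_cases hk0 : k = 0
    · subst hk0
      have hno : ∀ i, ¬ sep <+: (rest.drop (sep.length - 1)).drop i := by
        intro i
        rw [hshift]
        exact hmax _ (by omega)
      rw [pvSplit_no_occ sep hno]
      simp [PySem.Chars.join_singleton]
    · have hksl : sep.length ≤ k := by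
        by_contra hlt
        exact hover k (by omega) (by omega) (c :: rest) hp0 hk
      have hk' : sep <+: (rest.drop (sep.length - 1)).drop (k - sep.length) := by
        rw [hshift]
        have : sep.length + (k - sep.length) = k := by omega
        rw [this]
        exact hk
      have hmax' : ∀ i, k - sep.length < i → ¬ sep <+: (rest.drop (sep.length - 1)).drop i := by
        intro i hi
        rw [hshift]
        exact hmax _ (by omega)
      have h2 := pvSplit_two_le sep hsep hk'
      have hih := ih hk' hmax'
      -- l = sep ++ w
      obtain ⟨t, ht⟩ := hp0
      have hw : rest.drop (sep.length - 1) = t := by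
        rw [hdrop, ← ht, List.drop_left]
      cases hsp : pvSplit sep (rest.drop (sep.length - 1)) with
      | nil => exact absurd hsp (pvSplit_ne_nil _ _)
      | cons x u =>
        cases u with
        | nil => rw [hsp] at h2; simp at h2
        | cons y u' =>
          rw [hsp] at hih
          rw [List.dropLast_cons₂]
          cases hd : (x :: y :: u').dropLast with
          | nil => simp at hd
          | cons e es =>
            rw [hd] at hih
            rw [PySem.Chars.join_cons_cons, hih, hw, ← ht]
            rw [List.take_append, List.take_of_length_le hksl]
            simp
  | case3 c rest hp ih =>
    have hk0 : k ≠ 0 := by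
      intro h0
      subst h0
      exact hp (List.isPrefixOf_iff_prefix.mpr (by simpa using hk))
    obtain ⟨j, rfl⟩ : ∃ j, k = j + 1 := ⟨k - 1, by omega⟩
    simp only [List.drop_succ_cons] at hk
    have hmax' : ∀ i, j < i → ¬ sep <+: rest.drop i := by
      intro i hi
      simpa using hmax (i+1) (by omega)
    have h2 := pvSplit_two_le sep hsep hk
    simp only [pvSplit]
    rw [if_neg hp]
    rw [pvDropLast_modifyHead _ h2]
    have hdl : (pvSplit sep rest).dropLast ≠ [] := by
      have : (pvSplit sep rest).dropLast.length = (pvSplit sep rest).length - 1 := by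
        simp
      intro hnil
      rw [hnil] at this
      simp at this
      omega
    rw [pvJoin_modifyHead_cons sep c hdl, ih hk hmax']
    simp

theorem pvHover2 : ∀ i, 0 < i → i < ([')', '.'] : List Char).length →
    ∀ v : List Char, [')', '.'] <+: v → ¬ [')', '.'] <+: v.drop i := by
  intro i h1 h2 v hv
  have hi : i = 1 := by simp at h2; omega
  subst hi
  obtain ⟨t, ht⟩ := hv
  subst ht
  simp [List.cons_prefix_cons]

theorem pvHover1 : ∀ i, 0 < i → i < (['('] : List Char).length →
    ∀ v : List Char, ['('] <+: v → ¬ ['('] <+: v.drop i := by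
  intro i h1 h2
  simp at h2
  omega

theorem pvRfind_ge_neg_one (t sub : List Char) (hsub : sub ≠ []) :
    -1 ≤ PySem.Chars.rfind t sub := by
  by_cases hocc : ∃ i, sub <+: t.drop i
  · have := (pvRfind_spec hsub hocc).1
    omega
  · push_neg at hocc
    rw [pvRfind_none hocc]

theorem pvTail1 (t : List Char) :
    (pvSplit ['('] t).getLastD [] = t.drop ((PySem.Chars.rfind t ['('] + 1).toNat) := by
  by_cases hocc : ∃ i, ['('] <+: t.drop i
  · obtain ⟨h0, hoccR, hmax⟩ := pvRfind_spec (by simp) hocc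
    have ht : (PySem.Chars.rfind t ['('] + 1).toNat = (PySem.Chars.rfind t ['(']).toNat + 1 := by
      omega
    rw [pvSplit_getLastD ['('] (by simp) pvHover1 hoccR hmax, ht]
    simp
  · push_neg at hocc
    rw [pvSplit_no_occ _ hocc, pvRfind_none hocc]
    simp

theorem pvJoin1 (t : List Char) :
    PySem.Chars.join ['('] ((pvSplit ['('] t).dropLast)
      = if PySem.Chars.rfind t ['('] = -1 then [] else t.take (PySem.Chars.rfind t ['(']).toNat := by
  by_cases hocc : ∃ i, ['('] <+: t.drop i
  · obtain ⟨h0, hoccR, hmax⟩ := pvRfind_spec (by simp) hocc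
    rw [pvSplit_join_dropLast ['('] (by simp) pvHover1 hoccR hmax, if_neg (by omega)]
  · push_neg at hocc
    rw [pvSplit_no_occ _ hocc, pvRfind_none hocc, if_pos rfl]
    simp [PySem.Chars.join_nil]

theorem pvHead2 {s : List Char} (hf : 0 ≤ PySem.Chars.find s [')', '.']) :
    (pvSplit [')', '.'] s).headD [] = s.take (PySem.Chars.find s [')', '.']).toNat := by
  obtain ⟨hocc, hmin⟩ := PySem.Chars.find_spec hf
  exact pvSplit_headD _ (by simp) hocc hmin

theorem pvLast2 {s : List Char} (hf : 0 ≤ PySem.Chars.find s [')', '.']) :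
    (pvSplit [')', '.'] s).getLastD [] = s.drop ((PySem.Chars.rfind s [')', '.'] + 2).toNat) := by
  obtain ⟨hocc, hmin⟩ := PySem.Chars.find_spec hf
  obtain ⟨hR0, hoccR, hmaxR⟩ := pvRfind_spec (s := s) (by simp) ⟨_, hocc⟩
  rw [pvSplit_getLastD [')', '.'] (by simp) pvHover2 hoccR hmaxR]
  have : (PySem.Chars.rfind s [')', '.'] + 2).toNat = (PySem.Chars.rfind s [')', '.']).toNat + 2 := by
    omega
  rw [this]
  simp

theorem pvIsIn_false_iff (s : List Char) :
    (PySem.Chars.isIn [')', '.'] s = false) ↔ PySem.Chars.find s [')', '.'] = -1 := by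
  rw [PySem.Chars.isIn.eq_1]
  simp


-- canonical step pieces
def pvHeadOf (s : List Char) : List Char := s.take (PySem.Chars.find s [')', '.']).toNat

def pvDigitArg (s : List Char) : List Char :=
  (pvHeadOf s).drop ((PySem.Chars.rfind (pvHeadOf s) ['('] + 1).toNat)

def pvCanon (s : List Char) : List Char :=
  PySem.Chars.strip (if PySem.Chars.rfind (pvHeadOf s) ['('] = -1 then []
      else (pvHeadOf s).take (PySem.Chars.rfind (pvHeadOf s) ['(']).toNat)
    ++ '.' :: s.drop ((PySem.Chars.rfind s [')', '.'] + 2).toNat)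

theorem pvGtfA_stop {s : List Char} (fuel : Nat) (h : PySem.Chars.find s [')', '.'] = -1) :
    pvGtfA (fuel + 1) s = s := by
  rw [pvGtfA]
  rw [if_pos ((pvIsIn_false_iff s).mpr h)]

theorem pvGtfB_stop {s : List Char} (fuel : Nat) (h : PySem.Chars.find s [')', '.'] = -1) :
    pvGtfB (fuel + 1) s = s := by
  rw [pvGtfB]
  simp only [h]
  simp

theorem pvGtfA_step {s : List Char} (fuel : Nat) (hf : 0 ≤ PySem.Chars.find s [')', '.']) :
    pvGtfA (fuel + 1) s
      = if PySem.Chars.strIsdigit (pvDigitArg s) = false then s else pvGtfA fuel (pvCanon s) := by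
  have hisin : ¬ PySem.Chars.isIn [')', '.'] s = false := by
    rw [pvIsIn_false_iff s]
    omega
  rw [pvGtfA, if_neg hisin]
  simp only [pvSplitOn_eq [')', '.'] s (by simp), pvHead2 hf, pvSplitOn_eq ['('] _ (by simp),
    pvJoin1, pvLast2 hf, pvTail1]
  rfl

theorem pvGtfB_step {s : List Char} (fuel : Nat) (hf : 0 ≤ PySem.Chars.find s [')', '.']) :
    pvGtfB (fuel + 1) s
      = if PySem.Chars.strIsdigit (pvDigitArg s) = false then s else pvGtfB fuel (pvCanon s) := by
  have hne : ¬ PySem.Chars.find s [')', '.'] = -1 := by omega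
  have hocc2 : ∃ k, [')', '.'] <+: s.drop k := by
    obtain ⟨hocc, _⟩ := PySem.Chars.find_spec hf
    exact ⟨_, hocc⟩
  have hR0 : 0 ≤ PySem.Chars.rfind s [')', '.'] := (pvRfind_spec (by simp) hocc2).1
  have hJ1 : -1 ≤ PySem.Chars.rfind (s.take (PySem.Chars.find s [')', '.']).toNat) ['('] :=
    pvRfind_ge_neg_one _ _ (by simp)
  rw [pvGtfB]
  simp only [if_neg hne]
  simp only [PySem.List.slice_to _ hf]
  rw [PySem.List.slice_from _ (by omega), PySem.List.slice_from _ (by omega)]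
  have hrest : (if PySem.Chars.rfind (s.take (PySem.Chars.find s [')', '.']).toNat) ['('] ≠ -1 then
        PySem.List.slice (s.take (PySem.Chars.find s [')', '.']).toNat) none
          (some (PySem.Chars.rfind (s.take (PySem.Chars.find s [')', '.']).toNat) ['(']))
      else [])
      = (if PySem.Chars.rfind (s.take (PySem.Chars.find s [')', '.']).toNat) ['('] = -1 then []
      else (s.take (PySem.Chars.find s [')', '.']).toNat).take
        (PySem.Chars.rfind (s.take (PySem.Chars.find s [')', '.']).toNat) ['(']).toNat) := by
    by_cases hj : PySem.Chars.rfind (s.take (PySem.Chars.find s [')', '.']).toNat) ['('] = -1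
    · rw [if_neg (by simp [hj]), if_pos hj]
    · rw [if_pos hj, if_neg hj, PySem.List.slice_to _ (by omega)]
  rw [hrest]
  rfl

theorem pvGtf_eq (fuel : Nat) (s : List Char) : pvGtfA fuel s = pvGtfB fuel s := by
  induction fuel generalizing s with
  | zero => rw [pvGtfA, pvGtfB]
  | succ n ih =>
    by_cases hne : PySem.Chars.find s [')', '.'] = -1
    · rw [pvGtfA_stop n hne, pvGtfB_stop n hne]
    · have hf : 0 ≤ PySem.Chars.find s [')', '.'] := by
        have := PySem.Chars.neg_one_le_find s [')', '.']
        omega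
      rw [pvGtfA_step n hf, pvGtfB_step n hf]
      by_cases hd : PySem.Chars.strIsdigit (pvDigitArg s) = false
      · rw [if_pos hd, if_pos hd]
      · rw [if_neg hd, if_neg hd]
        exact ih (pvCanon s)

-- ===== VERDICT (by name: the statement is the Claim_ definition above) =====
theorem get_tagless_filename_spec : Claim_equal_get_tagless_filename := by
  unfold Claim_equal_get_tagless_filename
  intro filename _
  unfold Spec_get_tagless_filename get_tagless_filename get_tagless_filename_alt
  exact congrArg String.ofList (pvGtf_eq (filename.toList.length + 1) filename.toList)
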